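-- pv_equiv track=rewrite | github.com/sivm-rj/ppo-query-optimizer | env/join_order_env.py | mock_cost
-- ===== SOURCE A (Python) =====
-- def mock_cost(plan):
--     cost = 0
--     for i in range(1, len(plan)):
--         if abs(plan[i] - plan[i - 1]) > 1:
--             cost += 5
--         else:
--             cost += 1
--     return cost
-- ===== SOURCE B (Python) =====
-- def mock_cost(plan):
--     n = len(plan)
--     if n < 2:
--         return 0
--     if n == 2:
--         return 5 if abs(plan[0] - plan[1]) > 1 else 1
--     m = n // 2
--     return mock_cost(plan[:m + 1]) + mock_cost(plan[m:])
-- ===== Notes on version B (the rewrite author's own statement) =====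
-- stated objective: alternative
-- what changed: Replaces A's left-to-right accumulating index loop with a divide-and-conquer recursion: split the plan at the midpoint with one shared element, recurse on each half, and add the two costs; correct because the adjacent pairs of the two overlapping halves partition the adjacent pairs of the whole plan.
import Mathlib
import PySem

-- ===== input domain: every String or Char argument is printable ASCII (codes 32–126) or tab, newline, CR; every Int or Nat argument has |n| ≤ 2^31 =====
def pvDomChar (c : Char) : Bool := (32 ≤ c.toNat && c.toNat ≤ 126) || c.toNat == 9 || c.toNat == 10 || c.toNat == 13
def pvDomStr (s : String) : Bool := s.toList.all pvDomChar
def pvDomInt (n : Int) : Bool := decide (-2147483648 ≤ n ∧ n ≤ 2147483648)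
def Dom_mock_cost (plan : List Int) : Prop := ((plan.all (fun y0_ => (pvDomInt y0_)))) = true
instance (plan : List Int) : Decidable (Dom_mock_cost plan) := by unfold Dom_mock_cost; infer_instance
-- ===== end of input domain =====

-- B replaces A's accumulating index loop by a divide-and-conquer recursion on overlapping halves (alternative decomposition, same result).

-- ===== PORT A =====
def mock_cost (plan : List Int) : Int :=
  (PySem.List.pyRange 1 (plan.length : Int) 1).foldl
    (fun cost i =>
      if 1 < (PySem.List.pyGetD plan i 0 - PySem.List.pyGetD plan (i - 1) 0).natAbs
      then cost + 5 else cost + 1) 0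

-- ===== PORT B =====
-- plan[:m+1] / plan[m:] with the nonnegative Nat bound m = n // 2 are PySem.List.slice; n // 2 on a Nat is Python's '//'.
def mock_cost_alt (plan : List Int) : Int :=
  if plan.length < 2 then 0
  else if plan.length = 2 then
    (if 1 < (PySem.List.pyGetD plan 0 0 - PySem.List.pyGetD plan 1 0).natAbs then 5 else 1)
  else
    mock_cost_alt (PySem.List.slice plan none (some ((plan.length / 2 + 1 : Nat) : Int)))
      + mock_cost_alt (PySem.List.slice plan (some ((plan.length / 2 : Nat) : Int)) none)
termination_by plan.length
decreasing_by
  all_goals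
    simp only [PySem.List.slice_to_natCast, PySem.List.slice_from_natCast,
      List.length_take, List.length_drop]
    omega

-- ===== PRECONDITION & SPEC =====
def Spec_mock_cost (plan : List Int) (out : Int) : Prop := out = mock_cost_alt plan
instance (plan : List Int) (out : Int) : Decidable (Spec_mock_cost plan out) := by unfold Spec_mock_cost; infer_instance

-- ===== CLAIM (what is proved, stated in full; the proofs are below) =====
def Claim_equal_mock_cost : Prop := ∀ (plan : List Int), Dom_mock_cost plan → Spec_mock_cost plan (mock_cost plan)

-- ===== LEMMAS AND PROOFS =====

-- the per-pair weight of an adjacent pair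
def pvW (p : Int × Int) : Int := if 1 < (p.1 - p.2).natAbs then 5 else 1

-- the common characterisation: structural sum of weights over adjacent pairs
def pvS : List Int → Int
  | [] => 0
  | [_] => 0
  | a :: b :: t => pvW (a, b) + pvS (b :: t)

lemma pvW_swap (a b : Int) : pvW (b, a) = pvW (a, b) := by
  unfold pvW; have : (b - a).natAbs = (a - b).natAbs := by omega
  rw [this]

-- A's range of indices, mapped to the adjacent pairs, is exactly the zip of plan with its tail
lemma pv_map_range (plan : List Int) :
    (PySem.List.pyRange 1 (plan.length : Int) 1).map
      (fun i => (PySem.List.pyGetD plan i 0, PySem.List.pyGetD plan (i - 1) 0))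
      = (plan.zip (plan.drop 1)).map (fun p => (p.2, p.1)) := by
  apply List.ext_getElem
  · simp [PySem.List.length_pyRange_one, List.length_zip]
  · intro k h1 h2
    have hk : k < plan.length - 1 := by
      simpa [PySem.List.length_pyRange_one] using h1
    simp only [List.getElem_map, PySem.List.getElem_pyRange_one, List.getElem_zip,
      List.getElem_drop]
    have h1k : (0:Int) ≤ 1 + (k:Int) := by omega
    have h1k' : (1 + (k:Int)) < (plan.length : Int) := by omega
    rw [PySem.List.pyGetD_eq_getElem plan 0 h1k h1k']
    have e : (1 + (k:Int)) - 1 = ((k:Nat) : Int) := by omega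
    rw [e, PySem.List.pyGetD_natCast]
    have hk' : k < plan.length := by omega
    have e2 : (1 + (k:Int)).toNat = 1 + k := by omega
    simp [e2, List.getD_eq_getElem?_getD, List.getElem?_eq_getElem hk',
      Nat.add_comm 1 k]

-- the pair-weight sum IS pvS
lemma pv_sum_eq_pvS (plan : List Int) :
    ((plan.zip (plan.drop 1)).map pvW).sum = pvS plan := by
  induction plan using pvS.induct with
  | case1 => simp [pvS]
  | case2 a => simp [pvS]
  | case3 a b t ih =>
    simp only [List.drop_one, List.tail_cons, List.zip_cons_cons, List.map_cons,
      List.sum_cons, pvS]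
    rw [← ih]
    simp

-- A computes pvS
lemma pv_A_eq_pvS (plan : List Int) : mock_cost plan = pvS plan := by
  unfold mock_cost
  have hfun : (fun (cost i : Int) =>
      if 1 < (PySem.List.pyGetD plan i 0 - PySem.List.pyGetD plan (i - 1) 0).natAbs
      then cost + 5 else cost + 1)
      = (fun (cost i : Int) =>
          cost + pvW (PySem.List.pyGetD plan i 0, PySem.List.pyGetD plan (i - 1) 0)) := by
    funext cost i; unfold pvW; split_ifs <;> rfl
  rw [hfun, PySem.List.foldl_add]
  have hm : (PySem.List.pyRange 1 (plan.length : Int) 1).map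
      (fun i => pvW (PySem.List.pyGetD plan i 0, PySem.List.pyGetD plan (i - 1) 0))
      = List.map pvW ((plan.zip (plan.drop 1)).map (fun p => (p.2, p.1))) := by
    rw [← pv_map_range, List.map_map]; rfl
  rw [hm, List.map_map]
  have hcongr : ((plan.zip (plan.drop 1)).map (pvW ∘ fun p => (p.2, p.1)))
      = (plan.zip (plan.drop 1)).map pvW := by
    apply List.map_congr_left
    intro p _
    simp only [Function.comp]
    exact pvW_swap p.1 p.2
  rw [hcongr, pv_sum_eq_pvS]
  simp

-- splitting at any interior point with one shared element splits pvS
lemma pv_pvS_split (m : Nat) : ∀ (plan : List Int), 1 ≤ m → m + 1 ≤ plan.length →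
    pvS (plan.take (m + 1)) + pvS (plan.drop m) = pvS plan := by
  induction m with
  | zero => intro _ h; omega
  | succ m ih =>
    intro plan _ hlen
    match m, plan with
    | 0, a :: b :: t => simp [pvS]
    | (m + 1), a :: b :: t =>
      have hrec := ih (b :: t) (by omega) (by simp at hlen ⊢; omega)
      simp only [List.take_succ_cons, List.drop_succ_cons] at hrec ⊢
      simp only [pvS] at hrec ⊢
      omega

-- B computes pvS
lemma pv_B_eq_pvS (plan : List Int) : mock_cost_alt plan = pvS plan := by
  induction plan using mock_cost_alt.induct with
  | case1 plan h =>
    rw [mock_cost_alt]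
    simp only [if_pos h]
    match plan, h with
    | [], _ => rfl
    | [_], _ => rfl
  | case2 plan h h2 h3 =>
    rw [mock_cost_alt]
    simp only [if_neg h, if_pos h2, if_pos h3]
    match plan, h2, h3 with
    | [a, b], _, h3 =>
      simp only [PySem.List.pyGetD, PySem.List.pyGet?, PySem.List.pyIdx?] at h3
      simp only [pvS, pvW]
      simp_all
  | case3 plan h h2 h3 =>
    rw [mock_cost_alt]
    simp only [if_neg h, if_pos h2, if_neg h3]
    match plan, h2, h3 with
    | [a, b], _, h3 =>
      simp only [PySem.List.pyGetD, PySem.List.pyGet?, PySem.List.pyIdx?] at h3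
      simp only [pvS, pvW]
      simp_all
  | case4 plan h h2 iha ihb =>
    rw [mock_cost_alt]
    simp only [if_neg h, if_neg h2]
    rw [iha, ihb, PySem.List.slice_to_natCast, PySem.List.slice_from_natCast]
    exact pv_pvS_split (plan.length / 2) plan (by omega) (by omega)

-- ===== VERDICT (by name: the statement is the Claim_ definition above) =====
theorem mock_cost_spec : Claim_equal_mock_cost := by
  intro plan _
  unfold Spec_mock_cost
  rw [pv_A_eq_pvS, pv_B_eq_pvS]
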